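-- pv_equiv track=rewrite | github.com/ddung1203/TIL | COS_Pro/COS_PRO_2차/0들을_0으로_만들기.py | solution
-- ===== SOURCE A (Python) =====
-- def solution(s):
-- 	s += '#'
-- 	answer = ""
-- 	for i in range(len(s)):
-- 		if s[i] == '0' and s[i + 1] != '0':
-- 			answer += '0'
-- 		if s[i] == '1':
-- 			answer += '1'
-- 	return answer
-- ===== SOURCE B (Python) =====
-- def solution(s):
--     parts = []
--     i = 0
--     n = len(s)
--     while i < n:
--         c = s[i]
--         j = i
--         while j < n and s[j] == c:
--             j += 1
--         if c == '0':
--             parts.append('0')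
--         elif c == '1':
--             parts.append('1' * (j - i))
--         i = j
--     return ''.join(parts)
-- ===== Notes on version B (the rewrite author's own statement) =====
-- stated objective: alternative
-- what changed: Replaces A's sentinel-append index loop with a per-character lookahead comparison by a run-scan that consumes each maximal run of equal characters at once (one zero per zero run, the run's length of ones, other runs dropped) and joins the parts.
import Mathlib
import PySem

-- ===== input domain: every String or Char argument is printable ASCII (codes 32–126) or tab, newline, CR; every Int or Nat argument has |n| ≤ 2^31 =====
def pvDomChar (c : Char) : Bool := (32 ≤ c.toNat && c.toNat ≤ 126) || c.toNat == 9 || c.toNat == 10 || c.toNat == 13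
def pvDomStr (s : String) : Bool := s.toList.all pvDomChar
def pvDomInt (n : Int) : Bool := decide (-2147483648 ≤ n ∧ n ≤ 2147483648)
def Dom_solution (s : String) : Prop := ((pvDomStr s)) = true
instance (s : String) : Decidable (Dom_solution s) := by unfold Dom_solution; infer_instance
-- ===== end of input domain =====

-- B replaces A's '#'-sentinel index loop with lookahead by a run-collapse scan; same return value.

-- ===== PORT A =====
-- loop body of 'for i in range(len(s))' (answer built as List Char; answer += c is an append)
def solutionBody (t : List Char) (answer : List Char) (i : Int) : List Char :=
  let a1 := if PySem.List.pyGet? t i = some '0' ∧ PySem.List.pyGet? t (i + 1) ≠ some '0'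
            then answer ++ ['0'] else answer
  if PySem.List.pyGet? t i = some '1' then a1 ++ ['1'] else a1

def solution (s : String) : String :=
  -- t is s after 's += '#''
  String.ofList ((PySem.List.pyRange 0 ((s.toList ++ ['#']).length : Int) 1).foldl
    (solutionBody (s.toList ++ ['#'])) [])

-- ===== PORT B =====
-- run-scan: each step consumes one maximal run of equal characters (Source B's inner while loop)
def solutionAltRuns : List Char → List (List Char)
  | [] => []
  | c :: rest =>
    let run := rest.takeWhile (· == c)
    let tail := rest.dropWhile (· == c)
    (if c = '0' then [['0']]
     else if c = '1' then [List.replicate (run.length + 1) '1']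
     else []) ++ solutionAltRuns tail
termination_by l => l.length
decreasing_by
  simpa using Nat.lt_succ_of_le (List.length_dropWhile_le (· == c) rest)

def solution_alt (s : String) : String :=
  String.ofList (solutionAltRuns s.toList).flatten   -- ''.join(parts)

-- ===== PRECONDITION & SPEC =====
def Spec_solution (s : String) (out : String) : Prop := out = solution_alt s
instance (s : String) (out : String) : Decidable (Spec_solution s out) := by unfold Spec_solution; infer_instance

-- ===== CLAIM (what is proved, stated in full; the proofs are below) =====
def Claim_equal_solution : Prop := ∀ (s : String), Dom_solution s → Spec_solution s (solution s)

-- ===== LEMMAS AND PROOFS =====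

-- what A emits, read as a pair-scan over the sentinel-extended list
def emitA : List Char → List Char
  | [] => []
  | [c] => (if c = '0' then ['0'] else []) ++ (if c = '1' then ['1'] else [])
  | c :: d :: rest =>
      ((if c = '0' ∧ d ≠ '0' then ['0'] else []) ++ (if c = '1' then ['1'] else []))
        ++ emitA (d :: rest)

-- one iteration of A's loop, with the current and next character resolved
lemma body_step (t : List Char) (acc : List Char) (k : Nat) (c : Char) (o : Option Char)
    (hget : PySem.List.pyGet? t (k : Int) = some c)
    (hnext : PySem.List.pyGet? t ((k : Int) + 1) = o) :
    solutionBody t acc (k : Int)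
      = acc ++ ((if c = '0' ∧ o ≠ some '0' then ['0'] else [])
                 ++ (if c = '1' then ['1'] else [])) := by
  simp only [solutionBody, hget, hnext, Option.some.injEq]
  split_ifs with h1 h2 h2 <;> simp_all

lemma foldA (t : List Char) : ∀ (k : Nat) (acc : List Char), k ≤ t.length →
    (PySem.List.pyRange (k : Int) (t.length : Int) 1).foldl (solutionBody t) acc
      = acc ++ emitA (t.drop k) := by
  intro k
  induction hn : t.length - k generalizing k with
  | zero =>
    intro acc hk
    have hk' : k = t.length := by omega
    subst hk'
    rw [PySem.List.pyRange_one_eq_nil (by omega)]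
    simp [emitA]
  | succ n ih =>
    intro acc hk
    have hklt : k < t.length := by omega
    rw [PySem.List.pyRange_one_cons (by exact_mod_cast hklt)]
    have hcast : (k : Int) + 1 = ((k + 1 : Nat) : Int) := by push_cast; ring
    rw [List.foldl_cons, hcast, ih (k+1) (by omega) _ (by omega)]
    have hget : PySem.List.pyGet? t (k : Int) = some t[k] := by
      simp [pysem, hklt]
    have hdrop : t.drop k = t[k] :: t.drop (k+1) := List.drop_eq_getElem_cons hklt
    by_cases hend : k + 1 = t.length
    · have hnil : t.drop (k+1) = [] := by simp [hend]
      have hnone : PySem.List.pyGet? t ((k : Int) + 1) = none := by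
        rw [hcast]; simp [pysem, hend]
      rw [hdrop, hnil, body_step t acc k t[k] none hget hnone]
      simp only [emitA, List.append_nil]
      congr 2
      by_cases h0 : t[k] = '0' <;> simp [h0]
    · have hlt2 : k + 1 < t.length := by omega
      have hdrop2 : t.drop (k+1) = t[k+1] :: t.drop (k+2) := List.drop_eq_getElem_cons hlt2
      have hget2 : PySem.List.pyGet? t ((k : Int) + 1) = some t[k+1] := by
        rw [hcast, PySem.List.pyGet?_natCast]; exact List.getElem?_eq_getElem hlt2
      rw [hdrop, hdrop2, body_step t acc k t[k] (some t[k+1]) hget hget2]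
      simp only [emitA, List.append_assoc]
      congr 2
      by_cases h0 : t[k] = '0' <;> by_cases hnx : t[k+1] = '0' <;>
        simp [h0, hnx]

-- one maximal run: A emits exactly what B's run step emits
lemma emitA_run (c : Char) : ∀ (k : Nat) (tail : List Char), tail.head? ≠ some c →
    emitA (List.replicate (k + 1) c ++ tail ++ ['#'])
      = (if c = '0' then ['0'] else if c = '1' then List.replicate (k + 1) '1' else [])
        ++ emitA (tail ++ ['#']) := by
  intro k
  induction k with
  | zero =>
    intro tail hhead
    cases tail with
    | nil =>
      simp only [List.replicate, List.nil_append, List.cons_append, emitA, List.append_nil]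
      by_cases h0 : c = '0' <;> by_cases h1 : c = '1' <;>
        simp [h0, h1]
    | cons d rest =>
      have hd : d ≠ c := by simpa using hhead
      simp only [List.replicate, List.nil_append, List.cons_append, emitA]
      by_cases h0 : c = '0'
      · subst h0
        simp [hd]
      · by_cases h1 : c = '1' <;> simp [h0, h1]
  | succ k ih =>
    intro tail hhead
    have h2 : List.replicate (k + 1 + 1) c ++ tail ++ ['#']
        = c :: (List.replicate (k + 1) c ++ tail ++ ['#']) := by
      simp [List.replicate_succ]
    have hne : List.replicate (k + 1) c ++ tail ++ ['#']
        = c :: (List.replicate k c ++ tail ++ ['#']) := by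
      simp [List.replicate_succ]
    rw [h2, hne, emitA, ← hne, ih tail hhead]
    by_cases h0 : c = '0' <;> by_cases h1 : c = '1' <;>
      simp [h0, h1, List.replicate_succ]

lemma emitA_eq_flat : ∀ (n : Nat) (l : List Char), l.length = n →
    emitA (l ++ ['#']) = (solutionAltRuns l).flatten := by
  intro n
  induction n using Nat.strong_induction_on with
  | _ n ih =>
    intro l hn
    cases l with
    | nil => simp [emitA, solutionAltRuns]
    | cons c rest =>
      rw [solutionAltRuns]
      set run := rest.takeWhile (· == c) with hrun
      set tail := rest.dropWhile (· == c) with htail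
      have hsplit : rest = run ++ tail := (List.takeWhile_append_dropWhile).symm
      have hrepl : run = List.replicate run.length c := by
        apply List.eq_replicate_of_mem
        intro d hd
        have := List.mem_takeWhile_imp hd
        simpa using this
      have hhead : tail.head? ≠ some c := by
        intro h
        have hprop := List.head?_dropWhile_not (· == c) rest
        rw [← htail, h] at hprop
        simp at hprop
      have hlist : c :: rest ++ ['#'] = List.replicate (run.length + 1) c ++ tail ++ ['#'] := by
        rw [List.replicate_succ, ← hrepl]
        simp [hsplit]
      rw [hlist, emitA_run c run.length tail hhead]
      have hlen : rest.length + 1 = n := by simpa using hn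
      have htlen : tail.length < n := by
        have h1 : tail.length ≤ rest.length := List.length_dropWhile_le _ _
        omega
      rw [ih tail.length htlen tail rfl]
      by_cases h0 : c = '0' <;> by_cases h1 : c = '1' <;>
        simp [h0, h1]

-- ===== VERDICT (by name: the statement is the Claim_ definition above) =====
theorem solution_spec : Claim_equal_solution := by
  intro s _
  unfold Spec_solution solution solution_alt
  have h := foldA (s.toList ++ ['#']) 0 [] (by omega)
  simp only [Nat.cast_zero] at h
  rw [h, List.drop_zero, List.nil_append,
    emitA_eq_flat s.toList.length s.toList rfl]
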